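-- pv_equiv track=rewrite | github.com/KevenGe/LeetCode-Solutions | 力扣杯/第 273 场周赛/5964. 执行所有后缀指令.py | executeInstructions
-- ===== SOURCE A (Python) =====
-- from typing import List
--
-- def executeInstructions(n: int, startPos: List[int], s: str) -> List[int]:
--     ans = [0] * len(s)
--
--     def dfs(i, pos):
--         if i == n or not (pos[0] >= 0 and pos[0] < n - 1 and pos[1] >= 0 and pos[1] < n - 1):
--             pass
--
--     for i in range(len(s)):
--         if ans[i] == -1:
--             dfs(i, startPos)
--
--     las_pos = [0, 0]
--     changes = []
--     for i in range(len(s)):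
--         if s[i] == "L":
--             las_pos = [las_pos[0], las_pos[1] - 1]
--         elif s[i] == "R":
--             las_pos =[las_pos[0], las_pos[1] + 1]
--         elif s[i] == "U":
--             las_pos =[las_pos[0] - 1, las_pos[1]]
--         elif s[i] == "D":
--             las_pos =[las_pos[0] + 1, las_pos[1]]
--         changes.append(las_pos)
--
--     for i in range(len(s)):
--         pos = startPos[:]
--
--         for j in range(i, len(s)):
--             pos = [startPos[0] + changes[j][0], startPos[1] + changes[j][1]]
--             if i > 0:
--                 pos = [pos[0] - changes[i-1][0], pos[1] - changes[i-1][1]]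
--             if 0 <= pos[0] <= n - 1 and 0 <= pos[1] <= n - 1:
--                 ans[i] += 1
--             else:
--                 break
--     return ans
-- ===== SOURCE B (Python) =====
-- from typing import List
--
-- def executeInstructions(n: int, startPos: List[int], s: str) -> List[int]:
--     m = len(s)
--     if m == 0:
--         return []
--     r0, c0 = startPos[0], startPos[1]
--     # prefix displacement sums: Pr[k], Pc[k] = row/col displacement after k instructions
--     Pr = [0]
--     Pc = [0]
--     for ch in s:
--         dr = -1 if ch == "U" else (1 if ch == "D" else 0)
--         dc = -1 if ch == "L" else (1 if ch == "R" else 0)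
--         Pr.append(Pr[-1] + dr)
--         Pc.append(Pc[-1] + dc)
--     # scan suffixes right-to-left; nxt_r[v] = smallest j seen so far with Pr[j+1] == v
--     nxt_r = {}
--     nxt_c = {}
--     out = []
--     for i in range(m - 1, -1, -1):
--         nxt_r[Pr[i + 1]] = i
--         nxt_c[Pc[i + 1]] = i
--         r1 = r0 + Pr[i + 1] - Pr[i]
--         c1 = c0 + Pc[i + 1] - Pc[i]
--         if 0 <= r1 <= n - 1 and 0 <= c1 <= n - 1:
--             # first later step that lands exactly on a boundary crossing
--             j = m
--             for t in (Pr[i] - r0 - 1, Pr[i] + n - r0):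
--                 if t in nxt_r:
--                     j = min(j, nxt_r[t])
--             for t in (Pc[i] - c0 - 1, Pc[i] + n - c0):
--                 if t in nxt_c:
--                     j = min(j, nxt_c[t])
--             out.append(j - i)
--         else:
--             out.append(0)
--     out.reverse()
--     return out
-- ===== Notes on version B (the rewrite author's own statement) =====
-- stated objective: faster
-- what changed: Replaces A's per-suffix O(m) rescan (quadratic overall) by a single right-to-left pass: prefix displacement sums plus two hashmaps giving, per suffix, the earliest later index whose prefix sum hits one of the four boundary-crossing values; since every move is a unit step, the first out-of-bounds position lies exactly one cell outside the grid, so that earliest hit is the break point.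
import Mathlib
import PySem

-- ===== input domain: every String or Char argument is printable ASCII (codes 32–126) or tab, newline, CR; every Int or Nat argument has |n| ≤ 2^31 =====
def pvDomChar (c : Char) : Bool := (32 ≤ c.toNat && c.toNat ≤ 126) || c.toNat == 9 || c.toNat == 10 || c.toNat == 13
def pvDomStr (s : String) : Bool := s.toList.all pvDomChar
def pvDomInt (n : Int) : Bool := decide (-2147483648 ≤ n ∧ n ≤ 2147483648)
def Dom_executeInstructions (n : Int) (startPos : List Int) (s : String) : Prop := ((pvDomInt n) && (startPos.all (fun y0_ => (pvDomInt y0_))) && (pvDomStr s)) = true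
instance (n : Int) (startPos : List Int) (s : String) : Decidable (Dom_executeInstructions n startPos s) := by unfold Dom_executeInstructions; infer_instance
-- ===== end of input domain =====

-- B replaces A's quadratic per-suffix rescan by one right-to-left pass: prefix displacement
-- sums plus hashmaps of earliest boundary-crossing indices (objective: faster, asymptotic).

-- ===== PORT A =====
def pvStepA (p : Int × Int) (c : Char) : Int × Int :=
  if c = 'L' then (p.1, p.2 - 1)
  else if c = 'R' then (p.1, p.2 + 1)
  else if c = 'U' then (p.1 - 1, p.2)
  else if c = 'D' then (p.1 + 1, p.2)
  else p

-- the 'changes' list: changes[j] = las_pos after instruction j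
def pvChangesA (cs : List Char) : List (Int × Int) :=
  (cs.foldl (fun (st : (Int × Int) × List (Int × Int)) c =>
      let las := pvStepA st.1 c
      (las, st.2 ++ [las])) ((0, 0), [])).2

-- inner loop 'for j in range(i, len(s))' with break; acc = ans[i] so far
def pvInnerA (n s0 s1 : Int) (changes : List (Int × Int)) (i : Nat) :
    List Nat → Int → Int
  | [], acc => acc
  | j :: rest, acc =>
    let cj := changes.getD j (0, 0)      -- changes[j]: j < len(changes) whenever reached, so getD is exact
    let p0 : Int × Int := (s0 + cj.1, s1 + cj.2)
    let pos : Int × Int :=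
      if i > 0 then
        let ci := changes.getD (i - 1) (0, 0)   -- changes[i-1]: in range, exact
        (p0.1 - ci.1, p0.2 - ci.2)
      else p0
    if 0 ≤ pos.1 ∧ pos.1 ≤ n - 1 ∧ 0 ≤ pos.2 ∧ pos.2 ≤ n - 1 then
      pvInnerA n s0 s1 changes i rest (acc + 1)
    else acc

def executeInstructions (n : Int) (startPos : List Int) (s : String) : List Int :=
  let cs := s.toList
  let m := cs.length
  -- A's helper 'dfs' has body 'pass' and the loop calling it is guarded by 'ans[i] == -1',
  -- which is never true (ans = [0]*m): dead code, no effect, not reproduced.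
  let changes := pvChangesA cs
  let s0 := startPos.getD 0 0   -- startPos[0]/startPos[1]: only read when m > 0; in range under Pre_, so getD is exact
  let s1 := startPos.getD 1 0
  -- 'pos = startPos[:]' is overwritten before any read (the inner loop always runs ≥ 1 step): no effect
  (List.range m).map (fun i => pvInnerA n s0 s1 changes i (List.range' i (m - i)) 0)

-- ===== PORT B =====
def pvDR (c : Char) : Int := if c = 'U' then -1 else if c = 'D' then 1 else 0
def pvDC (c : Char) : Int := if c = 'L' then -1 else if c = 'R' then 1 else 0

-- Pr, Pc: prefix displacement sums, built by appending (Pr[-1] carried as second component)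
def pvPrefixB (cs : List Char) : List Int × List Int :=
  let st := cs.foldl
    (fun (st : (List Int × Int) × (List Int × Int)) ch =>
      let r := st.1.2 + pvDR ch
      let c := st.2.2 + pvDC ch
      ((st.1.1 ++ [r], r), (st.2.1 ++ [c], c)))
    (([0], 0), ([0], 0))
  (st.1.1, st.2.1)

-- one iteration of the right-to-left loop; state = (nxt_r, nxt_c, out)
def pvBStep (n r0 c0 : Int) (m : Nat) (Pr Pc : List Int)
    (st : PySem.Dict Int Int × PySem.Dict Int Int × List Int) (i : Nat) :
    PySem.Dict Int Int × PySem.Dict Int Int × List Int :=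
  let nr := st.1.insert (Pr.getD (i + 1) 0) (i : Int)        -- list indices in range: getD exact
  let nc := st.2.1.insert (Pc.getD (i + 1) 0) (i : Int)
  let r1 := r0 + Pr.getD (i + 1) 0 - Pr.getD i 0
  let c1 := c0 + Pc.getD (i + 1) 0 - Pc.getD i 0
  if 0 ≤ r1 ∧ r1 ≤ n - 1 ∧ 0 ≤ c1 ∧ c1 ≤ n - 1 then
    let j0 : Int := (m : Int)
    let j1 := match nr.get? (Pr.getD i 0 - r0 - 1) with | some v => min j0 v | none => j0
    let j2 := match nr.get? (Pr.getD i 0 + n - r0) with | some v => min j1 v | none => j1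
    let j3 := match nc.get? (Pc.getD i 0 - c0 - 1) with | some v => min j2 v | none => j2
    let j4 := match nc.get? (Pc.getD i 0 + n - c0) with | some v => min j3 v | none => j3
    (nr, nc, st.2.2 ++ [j4 - (i : Int)])
  else (nr, nc, st.2.2 ++ [(0 : Int)])

def executeInstructions_alt (n : Int) (startPos : List Int) (s : String) : List Int :=
  let cs := s.toList
  let m := cs.length
  if m = 0 then []
  else
    let r0 := startPos.getD 0 0   -- startPos[0]/startPos[1]: in range under Pre_, getD exact
    let c0 := startPos.getD 1 0
    let P := pvPrefixB cs
    -- for i in range(m-1, -1, -1)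
    let fin := ((List.range m).reverse).foldl (pvBStep n r0 c0 m P.1 P.2)
      (PySem.Dict.empty, PySem.Dict.empty, [])
    fin.2.2.reverse

-- ===== PRECONDITION & SPEC =====
-- A raises IndexError (startPos[0]/startPos[1] inside the inner loop) when s is nonempty and
-- startPos has fewer than 2 elements; those inputs are excluded. A returns on everything else.
def Pre_executeInstructions (n : Int) (startPos : List Int) (s : String) : Prop :=
  s.toList = [] ∨ 2 ≤ startPos.length
instance (n : Int) (startPos : List Int) (s : String) : Decidable (Pre_executeInstructions n startPos s) := by unfold Pre_executeInstructions; infer_instance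

def pvWitness_executeInstructions : Int × List Int × String := (4, [0, 1], "RRDLU")

def Spec_executeInstructions (n : Int) (startPos : List Int) (s : String) (out : List Int) : Prop := out = executeInstructions_alt n startPos s
instance (n : Int) (startPos : List Int) (s : String) (out : List Int) : Decidable (Spec_executeInstructions n startPos s out) := by unfold Spec_executeInstructions; infer_instance

-- ===== CLAIM (what is proved, stated in full; the proofs are below) =====
def Claim_equal_executeInstructions : Prop := ∀ (n : Int) (startPos : List Int) (s : String), Dom_executeInstructions n startPos s → Pre_executeInstructions n startPos s → Spec_executeInstructions n startPos s (executeInstructions n startPos s)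

-- ===== LEMMAS AND PROOFS =====

-- row/col prefix displacement after k instructions
def pvPre (cs : List Char) (k : Nat) : Int := ((cs.take k).map pvDR).sum
def pvPce (cs : List Char) (k : Nat) : Int := ((cs.take k).map pvDC).sum

-- position of suffix-i's walk after executing instruction j
def pvPos (r0 c0 : Int) (cs : List Char) (i j : Nat) : Int × Int :=
  (r0 + pvPre cs (j + 1) - pvPre cs i, c0 + pvPce cs (j + 1) - pvPce cs i)

def pvInBox (n : Int) (p : Int × Int) : Bool :=
  decide (0 ≤ p.1 ∧ p.1 ≤ n - 1 ∧ 0 ≤ p.2 ∧ p.2 ≤ n - 1)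

-- first index j ∈ [j0, m) with p j = true, else m
def pvFirst (p : Nat → Bool) (m j : Nat) : Nat :=
  if _h : j < m then (if p j then j else pvFirst p m (j + 1)) else m
termination_by m - j

def pvOpt (p : Nat → Bool) (m j : Nat) : Option Int :=
  if pvFirst p m j < m then some ((pvFirst p m j : Int)) else none


theorem pvStepA_eq (p : Int × Int) (c : Char) : pvStepA p c = (p.1 + pvDR c, p.2 + pvDC c) := by
  unfold pvStepA pvDR pvDC
  split_ifs with h1 h2 h3 h4 <;> subst_vars <;> simp_all <;> try omega

theorem pvPre_zero (cs : List Char) : pvPre cs 0 = 0 := rfl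
theorem pvPce_zero (cs : List Char) : pvPce cs 0 = 0 := rfl

theorem pvPre_append_le (cs : List Char) (c : Char) (k : Nat) (h : k ≤ cs.length) :
    pvPre (cs ++ [c]) k = pvPre cs k := by
  unfold pvPre
  rw [List.take_append_of_le_length h]

theorem pvPce_append_le (cs : List Char) (c : Char) (k : Nat) (h : k ≤ cs.length) :
    pvPce (cs ++ [c]) k = pvPce cs k := by
  unfold pvPce
  rw [List.take_append_of_le_length h]

theorem pvPre_append_top (cs : List Char) (c : Char) :
    pvPre (cs ++ [c]) (cs.length + 1) = pvPre cs cs.length + pvDR c := by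
  unfold pvPre
  rw [List.take_of_length_le (by simp)]
  rw [List.take_of_length_le (by simp)]
  simp

theorem pvPce_append_top (cs : List Char) (c : Char) :
    pvPce (cs ++ [c]) (cs.length + 1) = pvPce cs cs.length + pvDC c := by
  unfold pvPce
  rw [List.take_of_length_le (by simp)]
  rw [List.take_of_length_le (by simp)]
  simp

theorem pvChangesA_fold (cs : List Char) :
    cs.foldl (fun (st : (Int × Int) × List (Int × Int)) c =>
      let las := pvStepA st.1 c
      (las, st.2 ++ [las])) ((0, 0), [])
    = ((pvPre cs cs.length, pvPce cs cs.length),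
       (List.range cs.length).map (fun j => (pvPre cs (j + 1), pvPce cs (j + 1)))) := by
  induction cs using List.reverseRecOn with
  | nil => rfl
  | append_singleton cs c ih =>
      rw [List.foldl_append, ih]
      simp only [List.foldl_cons, List.foldl_nil, pvStepA_eq]
      rw [List.length_append, List.length_singleton]
      simp only [Prod.mk.injEq]
      refine ⟨⟨?_, ?_⟩, ?_⟩
      · rw [pvPre_append_top]
      · rw [pvPce_append_top]
      · rw [List.range_succ, List.map_append]
        congr 1
        · apply List.map_congr_left
          intro j hj
          rw [List.mem_range] at hj
          rw [pvPre_append_le _ _ _ (by omega), pvPce_append_le _ _ _ (by omega)]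
        · simp only [List.map_cons, List.map_nil]
          rw [pvPre_append_top, pvPce_append_top]

theorem pvChangesA_eq (cs : List Char) :
    pvChangesA cs = (List.range cs.length).map (fun j => (pvPre cs (j + 1), pvPce cs (j + 1))) := by
  unfold pvChangesA
  rw [pvChangesA_fold]

theorem pvPrefixB_fold (cs : List Char) :
    cs.foldl
    (fun (st : (List Int × Int) × (List Int × Int)) ch =>
      let r := st.1.2 + pvDR ch
      let c := st.2.2 + pvDC ch
      ((st.1.1 ++ [r], r), (st.2.1 ++ [c], c)))
    (([0], 0), ([0], 0))
    = (((List.range (cs.length + 1)).map (pvPre cs), pvPre cs cs.length),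
       ((List.range (cs.length + 1)).map (pvPce cs), pvPce cs cs.length)) := by
  induction cs using List.reverseRecOn with
  | nil => rfl
  | append_singleton cs c ih =>
      rw [List.foldl_append, ih]
      simp only [List.foldl_cons, List.foldl_nil]
      rw [List.length_append, List.length_singleton]
      simp only [Prod.mk.injEq]
      refine ⟨⟨?_, ?_⟩, ?_, ?_⟩
      · rw [List.range_succ (n := cs.length + 1), List.map_append]
        congr 1
        · apply List.map_congr_left
          intro j hj
          rw [List.mem_range] at hj
          rw [pvPre_append_le _ _ _ (by omega)]
        · simp only [List.map_cons, List.map_nil]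
          rw [pvPre_append_top]
      · rw [pvPre_append_top]
      · rw [List.range_succ (n := cs.length + 1), List.map_append]
        congr 1
        · apply List.map_congr_left
          intro j hj
          rw [List.mem_range] at hj
          rw [pvPce_append_le _ _ _ (by omega)]
        · simp only [List.map_cons, List.map_nil]
          rw [pvPce_append_top]
      · rw [pvPce_append_top]

theorem pvFirst_step (p : Nat → Bool) (m j : Nat) (h : j < m) :
    pvFirst p m j = if p j then j else pvFirst p m (j + 1) := by
  rw [pvFirst]
  simp [h]

theorem pvFirst_top (p : Nat → Bool) (m j : Nat) (h : ¬ j < m) :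
    pvFirst p m j = m := by
  rw [pvFirst]
  simp [h]

theorem pvFirst_le (p : Nat → Bool) (m j : Nat) (h : j ≤ m) : pvFirst p m j ≤ m := by
  induction hd : m - j generalizing j with
  | zero => rw [pvFirst_top p m j (by omega)]
  | succ d ih =>
      rw [pvFirst_step p m j (by omega)]
      by_cases hp : p j = true
      · rw [if_pos hp]; omega
      · rw [if_neg (by simp [hp])]
        exact ih (j + 1) (by omega) (by omega)

theorem pvFirst_ge (p : Nat → Bool) (m j : Nat) (h : j ≤ m) : j ≤ pvFirst p m j := by
  induction hd : m - j generalizing j with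
  | zero => rw [pvFirst_top p m j (by omega)]; omega
  | succ d ih =>
      rw [pvFirst_step p m j (by omega)]
      by_cases hp : p j = true
      · rw [if_pos hp]
      · rw [if_neg (by simp [hp])]
        have := ih (j + 1) (by omega) (by omega)
        omega

theorem pvFirst_true (p : Nat → Bool) (m j : Nat) (h : pvFirst p m j < m) :
    p (pvFirst p m j) = true := by
  induction hd : m - j generalizing j with
  | zero => rw [pvFirst_top p m j (by omega)] at h ⊢; omega
  | succ d ih =>
      rw [pvFirst_step p m j (by omega)] at h ⊢
      by_cases hp : p j = true
      · rw [if_pos hp] at h ⊢; exact hp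
      · rw [if_neg (by simp [hp])] at h ⊢
        exact ih (j + 1) h (by omega)

theorem pvFirst_min (p : Nat → Bool) (m j k : Nat) (hjk : j ≤ k) (hk : k < m)
    (hp : p k = true) : pvFirst p m j ≤ k := by
  induction hd : k - j generalizing j with
  | zero =>
      have hjke : j = k := by omega
      subst hjke
      rw [pvFirst_step p m j hk, if_pos hp]
  | succ d ih =>
      rw [pvFirst_step p m j (by omega)]
      by_cases hq : p j = true
      · rw [if_pos hq]; omega
      · rw [if_neg (by simp [hq])]
        exact ih (j + 1) (by omega) (by omega)

theorem pvFirst_false (p : Nat → Bool) (m j k : Nat) (hjk : j ≤ k)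
    (hk : k < pvFirst p m j) : p k = false := by
  by_cases hkm : k < m
  · by_cases hp : p k = true
    · have := pvFirst_min p m j k hjk hkm hp
      omega
    · simpa using hp
  · by_cases hjm : j ≤ m
    · have := pvFirst_le p m j hjm
      omega
    · rw [pvFirst_top p m j (by omega)] at hk
      omega

def pvViol (n r0 c0 : Int) (cs : List Char) (i j : Nat) : Bool :=
  !pvInBox n (pvPos r0 c0 cs i j)

theorem pvDR_bounds (c : Char) : -1 ≤ pvDR c ∧ pvDR c ≤ 1 := by
  unfold pvDR; split_ifs <;> omega

theorem pvDC_bounds (c : Char) : -1 ≤ pvDC c ∧ pvDC c ≤ 1 := by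
  unfold pvDC; split_ifs <;> omega

theorem pvPre_succ (cs : List Char) (k : Nat) (h : k < cs.length) :
    pvPre cs (k + 1) = pvPre cs k + pvDR (cs.getD k 'a') := by
  unfold pvPre
  rw [List.map_take, List.map_take, List.sum_take_succ (List.map pvDR cs) k (by simpa using h)]
  simp [List.getD_eq_getElem?_getD, List.getElem?_eq_getElem h]

theorem pvPce_succ (cs : List Char) (k : Nat) (h : k < cs.length) :
    pvPce cs (k + 1) = pvPce cs k + pvDC (cs.getD k 'a') := by
  unfold pvPce
  rw [List.map_take, List.map_take, List.sum_take_succ (List.map pvDC cs) k (by simpa using h)]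
  simp [List.getD_eq_getElem?_getD, List.getElem?_eq_getElem h]

theorem pvChangesA_getD (cs : List Char) (j : Nat) (h : j < cs.length) :
    (pvChangesA cs).getD j (0, 0) = (pvPre cs (j + 1), pvPce cs (j + 1)) := by
  rw [pvChangesA_eq]
  exact PySem.List.getD_map_range _ _ _ _ h

theorem pvInnerA_eq (n r0 c0 : Int) (cs : List Char) (i : Nat) (him : i < cs.length) :
    ∀ (j : Nat) (acc : Int), i ≤ j → j ≤ cs.length →
    pvInnerA n r0 c0 (pvChangesA cs) i (List.range' j (cs.length - j)) acc
      = acc + ((pvFirst (pvViol n r0 c0 cs i) cs.length j : Int) - (j : Int)) := by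
  intro j acc hij hjm
  induction hd : cs.length - j generalizing j acc with
  | zero =>
      rw [pvFirst_top _ _ _ (by omega)]
      have : j = cs.length := by omega
      subst this
      simp [pvInnerA, List.range']
  | succ d ih =>
      have hjlt : j < cs.length := by omega
      rw [List.range'_succ]
      simp only [pvInnerA]
      rw [pvChangesA_getD cs j hjlt]
      have hpos : (if i > 0 then
          let ci := (pvChangesA cs).getD (i - 1) (0, 0)
          ((r0 + (pvPre cs (j + 1), pvPce cs (j + 1)).1, c0 + (pvPre cs (j + 1), pvPce cs (j + 1)).2).1 - ci.1,
           (r0 + (pvPre cs (j + 1), pvPce cs (j + 1)).1, c0 + (pvPre cs (j + 1), pvPce cs (j + 1)).2).2 - ci.2)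
        else (r0 + (pvPre cs (j + 1), pvPce cs (j + 1)).1, c0 + (pvPre cs (j + 1), pvPce cs (j + 1)).2))
          = pvPos r0 c0 cs i j := by
        by_cases hi : i > 0
        · rw [if_pos hi, pvChangesA_getD cs (i - 1) (by omega)]
          have : i - 1 + 1 = i := by omega
          rw [this]
          simp [pvPos]
        · rw [if_neg hi]
          have : i = 0 := by omega
          subst this
          simp [pvPos, pvPre_zero, pvPce_zero]
      rw [hpos]
      by_cases hv : pvViol n r0 c0 cs i j = true
      · have hcond : ¬ (0 ≤ (pvPos r0 c0 cs i j).1 ∧ (pvPos r0 c0 cs i j).1 ≤ n - 1 ∧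
            0 ≤ (pvPos r0 c0 cs i j).2 ∧ (pvPos r0 c0 cs i j).2 ≤ n - 1) := by
          unfold pvViol pvInBox at hv
          simp at hv
          omega
        rw [if_neg hcond, pvFirst_step _ _ _ hjlt, if_pos hv]
        ring
      · have hcond : (0 ≤ (pvPos r0 c0 cs i j).1 ∧ (pvPos r0 c0 cs i j).1 ≤ n - 1 ∧
            0 ≤ (pvPos r0 c0 cs i j).2 ∧ (pvPos r0 c0 cs i j).2 ≤ n - 1) := by
          unfold pvViol pvInBox at hv
          simp at hv
          omega
        rw [if_pos hcond]
        have hrec := ih (j + 1) (acc + 1) (by omega) (by omega) (by omega)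
        rw [hrec, pvFirst_step _ _ _ hjlt, if_neg (by simp [hv])]
        have := pvFirst_ge (pvViol n r0 c0 cs i) cs.length (j + 1) (by omega)
        push_cast
        omega

-- A's result, index by index
theorem executeInstructions_eq_map (n : Int) (startPos : List Int) (s : String) :
    executeInstructions n startPos s
      = (List.range s.toList.length).map (fun i =>
          ((pvFirst (pvViol n (startPos.getD 0 0) (startPos.getD 1 0) s.toList i) s.toList.length i : Int) - (i : Int))) := by
  unfold executeInstructions
  apply List.map_congr_left
  intro i hi
  rw [List.mem_range] at hi
  rw [pvInnerA_eq n _ _ s.toList i hi i 0 (by omega) (by omega)]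
  ring

-- the value B appends for index i, with dict lookups replaced by their meaning
def pvG (n r0 c0 : Int) (cs : List Char) (i : Nat) : Int :=
  let m := cs.length
  if 0 ≤ (pvPos r0 c0 cs i i).1 ∧ (pvPos r0 c0 cs i i).1 ≤ n - 1 ∧
      0 ≤ (pvPos r0 c0 cs i i).2 ∧ (pvPos r0 c0 cs i i).2 ≤ n - 1 then
    (let j0 : Int := (m : Int)
     let j1 := match pvOpt (fun j => decide (pvPre cs (j + 1) = pvPre cs i - r0 - 1)) m i with
       | some v => min j0 v | none => j0
     let j2 := match pvOpt (fun j => decide (pvPre cs (j + 1) = pvPre cs i + n - r0)) m i with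
       | some v => min j1 v | none => j1
     let j3 := match pvOpt (fun j => decide (pvPce cs (j + 1) = pvPce cs i - c0 - 1)) m i with
       | some v => min j2 v | none => j2
     let j4 := match pvOpt (fun j => decide (pvPce cs (j + 1) = pvPce cs i + n - c0)) m i with
       | some v => min j3 v | none => j3
     j4) - (i : Int)
  else 0

-- dict invariant: nxt_r/nxt_c hold, per value, the first index ≥ i where the prefix sum hits it
def pvInvR (cs : List Char) (d : PySem.Dict Int Int) (i : Nat) : Prop :=
  ∀ v : Int, d.get? v = pvOpt (fun j => decide (pvPre cs (j + 1) = v)) cs.length i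

def pvInvC (cs : List Char) (d : PySem.Dict Int Int) (i : Nat) : Prop :=
  ∀ v : Int, d.get? v = pvOpt (fun j => decide (pvPce cs (j + 1) = v)) cs.length i

theorem pvInvR_step (cs : List Char) (d : PySem.Dict Int Int) (i : Nat) (hi : i < cs.length)
    (h : pvInvR cs d (i + 1)) : pvInvR cs (d.insert (pvPre cs (i + 1)) (i : Int)) i := by
  intro v
  rw [PySem.Dict.get?_insert]
  by_cases hv : v = pvPre cs (i + 1)
  · rw [if_pos hv]
    unfold pvOpt
    rw [pvFirst_step _ _ _ hi]
    rw [if_pos (show decide (pvPre cs (i + 1) = v) = true by simp [hv])]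
    rw [if_pos hi]
  · rw [if_neg hv, h v]
    unfold pvOpt
    rw [pvFirst_step _ _ _ hi]
    rw [if_neg (show ¬ decide (pvPre cs (i + 1) = v) = true by simp; exact fun hh => hv hh.symm)]

theorem pvInvC_step (cs : List Char) (d : PySem.Dict Int Int) (i : Nat) (hi : i < cs.length)
    (h : pvInvC cs d (i + 1)) : pvInvC cs (d.insert (pvPce cs (i + 1)) (i : Int)) i := by
  intro v
  rw [PySem.Dict.get?_insert]
  by_cases hv : v = pvPce cs (i + 1)
  · rw [if_pos hv]
    unfold pvOpt
    rw [pvFirst_step _ _ _ hi]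
    rw [if_pos (show decide (pvPce cs (i + 1) = v) = true by simp [hv])]
    rw [if_pos hi]
  · rw [if_neg hv, h v]
    unfold pvOpt
    rw [pvFirst_step _ _ _ hi]
    rw [if_neg (show ¬ decide (pvPce cs (i + 1) = v) = true by simp; exact fun hh => hv hh.symm)]

theorem pvPrefixB_eq (cs : List Char) :
    pvPrefixB cs = ((List.range (cs.length + 1)).map (pvPre cs),
                    (List.range (cs.length + 1)).map (pvPce cs)) := by
  unfold pvPrefixB
  rw [pvPrefixB_fold]

theorem pvBStep_eq (n r0 c0 : Int) (cs : List Char) (dR dC : PySem.Dict Int Int)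
    (acc : List Int) (i : Nat) (hi : i < cs.length)
    (hR : pvInvR cs dR (i + 1)) (hC : pvInvC cs dC (i + 1)) :
    pvBStep n r0 c0 cs.length ((List.range (cs.length + 1)).map (pvPre cs))
        ((List.range (cs.length + 1)).map (pvPce cs)) (dR, dC, acc) i
      = (dR.insert (pvPre cs (i + 1)) (i : Int), dC.insert (pvPce cs (i + 1)) (i : Int),
         acc ++ [pvG n r0 c0 cs i]) := by
  unfold pvBStep pvG
  simp only []
  rw [PySem.List.getD_map_range (pvPre cs) _ (i + 1) 0 (by omega)]
  rw [PySem.List.getD_map_range (pvPre cs) _ i 0 (by omega)]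
  rw [PySem.List.getD_map_range (pvPce cs) _ (i + 1) 0 (by omega)]
  rw [PySem.List.getD_map_range (pvPce cs) _ i 0 (by omega)]
  rw [(pvInvR_step cs dR i hi hR) (pvPre cs i - r0 - 1)]
  rw [(pvInvR_step cs dR i hi hR) (pvPre cs i + n - r0)]
  rw [(pvInvC_step cs dC i hi hC) (pvPce cs i - c0 - 1)]
  rw [(pvInvC_step cs dC i hi hC) (pvPce cs i + n - c0)]
  have hpos1 : r0 + pvPre cs (i + 1) - pvPre cs i = (pvPos r0 c0 cs i i).1 := rfl
  have hpos2 : c0 + pvPce cs (i + 1) - pvPce cs i = (pvPos r0 c0 cs i i).2 := rfl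
  rw [hpos1, hpos2]
  split_ifs <;> rfl

theorem pvInvR_empty (cs : List Char) : pvInvR cs PySem.Dict.empty cs.length := by
  intro v
  rw [PySem.Dict.get?_empty]
  unfold pvOpt
  rw [pvFirst_top _ _ _ (by omega)]
  simp

theorem pvInvC_empty (cs : List Char) : pvInvC cs PySem.Dict.empty cs.length := by
  intro v
  rw [PySem.Dict.get?_empty]
  unfold pvOpt
  rw [pvFirst_top _ _ _ (by omega)]
  simp

theorem pvBLoop_eq (n r0 c0 : Int) (cs : List Char) :
    ∀ (i : Nat), i ≤ cs.length →
    ∀ (dR dC : PySem.Dict Int Int) (acc : List Int),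
    pvInvR cs dR i → pvInvC cs dC i →
    ((List.range i).reverse.foldl
        (pvBStep n r0 c0 cs.length ((List.range (cs.length + 1)).map (pvPre cs))
          ((List.range (cs.length + 1)).map (pvPce cs)))
        (dR, dC, acc)).2.2
      = acc ++ (List.range i).reverse.map (pvG n r0 c0 cs) := by
  intro i
  induction i with
  | zero => intro _ dR dC acc _ _; simp
  | succ i ih =>
      intro hle dR dC acc hR hC
      rw [show (List.range (i + 1)).reverse = i :: (List.range i).reverse by
        rw [List.range_succ]; simp]
      simp only [List.foldl_cons, List.map_cons]
      rw [pvBStep_eq n r0 c0 cs dR dC acc i (by omega) hR hC]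
      rw [ih (by omega) _ _ _ (pvInvR_step cs dR i (by omega) hR) (pvInvC_step cs dC i (by omega) hC)]
      simp

theorem pvMatchOpt (p : Nat → Bool) (m i : Nat) (a : Int) (him : i ≤ m) (ha : a ≤ (m : Int)) :
    (match pvOpt p m i with | some v => min a v | none => a)
      = min a ((pvFirst p m i : Int)) := by
  unfold pvOpt
  have hle := pvFirst_le p m i him
  by_cases h : pvFirst p m i < m
  · simp [h]
  · rw [if_neg h]
    have hfm : pvFirst p m i = m := by omega
    rw [hfm]
    simp
    omega

-- a prefix-sum hit of one of the four boundary values is an out-of-bounds position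
theorem pvHit_viol_r (n r0 c0 : Int) (cs : List Char) (i j : Nat)
    (h : pvPre cs (j + 1) = pvPre cs i - r0 - 1 ∨ pvPre cs (j + 1) = pvPre cs i + n - r0) :
    pvViol n r0 c0 cs i j = true := by
  unfold pvViol pvInBox pvPos
  simp
  omega

theorem pvHit_viol_c (n r0 c0 : Int) (cs : List Char) (i j : Nat)
    (h : pvPce cs (j + 1) = pvPce cs i - c0 - 1 ∨ pvPce cs (j + 1) = pvPce cs i + n - c0) :
    pvViol n r0 c0 cs i j = true := by
  unfold pvViol pvInBox pvPos
  simp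
  omega

theorem pvG_eq (n r0 c0 : Int) (cs : List Char) (i : Nat) (hi : i < cs.length) :
    pvG n r0 c0 cs i
      = (pvFirst (pvViol n r0 c0 cs i) cs.length i : Int) - (i : Int) := by
  by_cases hc : 0 ≤ (pvPos r0 c0 cs i i).1 ∧ (pvPos r0 c0 cs i i).1 ≤ n - 1 ∧
      0 ≤ (pvPos r0 c0 cs i i).2 ∧ (pvPos r0 c0 cs i i).2 ≤ n - 1
  · unfold pvG
    rw [if_pos hc]
    simp only []
    have hvi : pvViol n r0 c0 cs i i = false := by
      unfold pvViol pvInBox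
      simp
      omega
    set m := cs.length with hm
    set p1 := fun j => decide (pvPre cs (j + 1) = pvPre cs i - r0 - 1) with hp1
    set p2 := fun j => decide (pvPre cs (j + 1) = pvPre cs i + n - r0) with hp2
    set p3 := fun j => decide (pvPce cs (j + 1) = pvPce cs i - c0 - 1) with hp3
    set p4 := fun j => decide (pvPce cs (j + 1) = pvPce cs i + n - c0) with hp4
    rw [pvMatchOpt p1 m i _ (by omega) (by omega)]
    rw [pvMatchOpt p2 m i _ (by omega) (by omega)]
    rw [pvMatchOpt p3 m i _ (by omega) (by omega)]
    rw [pvMatchOpt p4 m i _ (by omega) (by omega)]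
    set V := pvFirst (pvViol n r0 c0 cs i) m i with hV
    set f1 := pvFirst p1 m i with hf1
    set f2 := pvFirst p2 m i with hf2
    set f3 := pvFirst p3 m i with hf3
    set f4 := pvFirst p4 m i with hf4
    have hVle : V ≤ m := pvFirst_le _ _ _ (by omega)
    have hVge : i ≤ V := pvFirst_ge _ _ _ (by omega)
    have h1le : f1 ≤ m := pvFirst_le _ _ _ (by omega)
    have h2le : f2 ≤ m := pvFirst_le _ _ _ (by omega)
    have h3le : f3 ≤ m := pvFirst_le _ _ _ (by omega)
    have h4le : f4 ≤ m := pvFirst_le _ _ _ (by omega)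
    have h1ge : i ≤ f1 := pvFirst_ge _ _ _ (by omega)
    have h2ge : i ≤ f2 := pvFirst_ge _ _ _ (by omega)
    have h3ge : i ≤ f3 := pvFirst_ge _ _ _ (by omega)
    have h4ge : i ≤ f4 := pvFirst_ge _ _ _ (by omega)
    have hVf1 : V ≤ f1 := by
      by_cases h : f1 < m
      · exact pvFirst_min _ _ _ _ h1ge h
          (pvHit_viol_r n r0 c0 cs i f1 (Or.inl (by simpa [hp1] using pvFirst_true p1 m i h)))
      · omega
    have hVf2 : V ≤ f2 := by
      by_cases h : f2 < m
      · exact pvFirst_min _ _ _ _ h2ge h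
          (pvHit_viol_r n r0 c0 cs i f2 (Or.inr (by simpa [hp2] using pvFirst_true p2 m i h)))
      · omega
    have hVf3 : V ≤ f3 := by
      by_cases h : f3 < m
      · exact pvFirst_min _ _ _ _ h3ge h
          (pvHit_viol_c n r0 c0 cs i f3 (Or.inl (by simpa [hp3] using pvFirst_true p3 m i h)))
      · omega
    have hVf4 : V ≤ f4 := by
      by_cases h : f4 < m
      · exact pvFirst_min _ _ _ _ h4ge h
          (pvHit_viol_c n r0 c0 cs i f4 (Or.inr (by simpa [hp4] using pvFirst_true p4 m i h)))
      · omega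
    by_cases hVm : V < m
    · -- the first violation is reached from an in-bounds position by a unit step:
      -- it lies exactly on a boundary value, so one of the four first hits is ≤ V
      have hiV : i < V := by
        by_contra hcon
        have hVm' : pvFirst (pvViol n r0 c0 cs i) m i < m := by rw [← hV]; exact hVm
        have hVi2 : pvFirst (pvViol n r0 c0 cs i) m i = i := by rw [← hV]; omega
        have htrue := pvFirst_true (pvViol n r0 c0 cs i) m i hVm'
        rw [hVi2] at htrue
        rw [htrue] at hvi
        simp at hvi
      have hviolV : pvViol n r0 c0 cs i V = true := pvFirst_true _ _ _ hVm
      have hprev : pvViol n r0 c0 cs i (V - 1) = false :=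
        pvFirst_false (pvViol n r0 c0 cs i) m i (V - 1) (by omega) (by rw [← hV]; omega)
      have hV1 : V - 1 + 1 = V := by omega
      have hsr : pvPre cs (V + 1) = pvPre cs V + pvDR (cs.getD V 'a') := pvPre_succ cs V hVm
      have hsc : pvPce cs (V + 1) = pvPce cs V + pvDC (cs.getD V 'a') := pvPce_succ cs V hVm
      have hdr := pvDR_bounds (cs.getD V 'a')
      have hdc := pvDC_bounds (cs.getD V 'a')
      unfold pvViol pvInBox pvPos at hviolV hprev
      rw [hV1] at hprev
      simp at hviolV hprev
      have hcase : pvPre cs (V + 1) = pvPre cs i - r0 - 1 ∨ pvPre cs (V + 1) = pvPre cs i + n - r0 ∨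
          pvPce cs (V + 1) = pvPce cs i - c0 - 1 ∨ pvPce cs (V + 1) = pvPce cs i + n - c0 := by
        omega
      rcases hcase with h | h | h | h
      · have : f1 ≤ V := pvFirst_min p1 m i V (by omega) hVm (by simp [hp1, h])
        omega
      · have : f2 ≤ V := pvFirst_min p2 m i V (by omega) hVm (by simp [hp2, h])
        omega
      · have : f3 ≤ V := pvFirst_min p3 m i V (by omega) hVm (by simp [hp3, h])
        omega
      · have : f4 ≤ V := pvFirst_min p4 m i V (by omega) hVm (by simp [hp4, h])
        omega
    · omega
  · unfold pvG
    rw [if_neg hc]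
    have hv : pvViol n r0 c0 cs i i = true := by
      unfold pvViol pvInBox
      simp
      omega
    rw [pvFirst_step _ _ _ hi, if_pos hv]
    omega

theorem executeInstructions_alt_eq_map (n : Int) (startPos : List Int) (s : String) :
    executeInstructions_alt n startPos s
      = (List.range s.toList.length).map (pvG n (startPos.getD 0 0) (startPos.getD 1 0) s.toList) := by
  unfold executeInstructions_alt
  simp only []
  by_cases hm : s.toList.length = 0
  · rw [if_pos hm, hm]
    simp
  · rw [if_neg hm, pvPrefixB_eq]
    simp only []
    rw [pvBLoop_eq n (startPos.getD 0 0) (startPos.getD 1 0) s.toList s.toList.length le_rfl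
        PySem.Dict.empty PySem.Dict.empty [] (pvInvR_empty _) (pvInvC_empty _)]
    simp [List.map_reverse]

-- ===== VERDICT (by name: the statement is the Claim_ definition above) =====
theorem executeInstructions_spec : Claim_equal_executeInstructions := by
  intro n startPos s _ _
  unfold Spec_executeInstructions
  rw [executeInstructions_eq_map, executeInstructions_alt_eq_map]
  apply List.map_congr_left
  intro i hi
  rw [List.mem_range] at hi
  rw [pvG_eq n (startPos.getD 0 0) (startPos.getD 1 0) s.toList i hi]
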